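-- pv_equiv track=rewrite | github.com/nicastelo/nah | src/nah/context.py | _extract_ssh_host
-- ===== SOURCE A (Python) =====
-- def _looks_like_local_path(arg: str) -> bool:
--     """Check if an argument looks like a local file path rather than a hostname."""
--     return arg.startswith(("/", "./", "../", "~"))
--
-- def _strip_host_from_colon_suffix(s: str) -> str:
--     """Extract hostname from host:port or host:path, handling [IPv6] brackets."""
--     if s.startswith("["):
--         end = s.find("]")
--         if end != -1:
--             return s[1:end]
--     return s.split(":")[0]
--
-- _SSH_VALUED_FLAGS = {
--     "-b", "-c", "-D", "-E", "-e", "-F", "-I", "-i", "-J", "-L",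
--     "-l", "-m", "-O", "-o", "-P", "-p", "-Q", "-R", "-S", "-W", "-w",
-- }
--
-- def _extract_ssh_host(cmd: str, args: list[str]) -> str | None:
--     """Extract host from ssh/scp/sftp args.
--
--     Two-pass approach:
--     1. Prefer args with @ (user@host) — unambiguous.
--     2. For scp, prefer args with : (host:path) — remote indicator.
--     3. Fall back to first positional that doesn't look like a local path.
--     """
--     positionals = _collect_positionals(args, _SSH_VALUED_FLAGS)
--
--     # Pass 1: look for user@host
--     for arg in positionals:
--         if "@" in arg:
--             host_part = arg.split("@", 1)[1]
--             return _strip_host_from_colon_suffix(host_part) if ":" in host_part else host_part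
--
--     # Pass 2 (scp/sftp): look for host:path (colon indicates remote)
--     if cmd in ("scp", "sftp"):
--         for arg in positionals:
--             if ":" in arg:
--                 return _strip_host_from_colon_suffix(arg)
--
--     # Pass 3: first positional that doesn't look like a local path
--     for arg in positionals:
--         if not _looks_like_local_path(arg):
--             return arg
--
--     return None
--
-- def _collect_positionals(args: list[str], valued_flags: set[str]) -> list[str]:
--     """Collect positional (non-flag) args, skipping valued flags and their values."""
--     positionals = []
--     skip_next = False
--     for arg in args:
--         if skip_next:
--             skip_next = False
--             continue
--         if arg.startswith("-"):
--             if arg in valued_flags: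
--                 skip_next = True
--             continue
--         positionals.append(arg)
--     return positionals
-- ===== SOURCE B (Python) =====
-- _SSH_VALUED_FLAGS = {
--     "-b", "-c", "-D", "-E", "-e", "-F", "-I", "-i", "-J", "-L",
--     "-l", "-m", "-O", "-o", "-P", "-p", "-Q", "-R", "-S", "-W", "-w",
-- }
--
-- def _strip_host_from_colon_suffix(s):
--     if s.startswith("["):
--         end = s.find("]")
--         if end != -1:
--             return s[1:end]
--     return s.split(":")[0]
--
-- def _extract_ssh_host(cmd, args):
--     # single pass: maintain first user@host host-part, first colon arg,
--     # and first non-local-path positional; dispatch at the end.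
--     at_host = colon_arg = plain = None
--     skip = False
--     for arg in args:
--         if skip:
--             skip = False
--             continue
--         if arg.startswith("-"):
--             skip = arg in _SSH_VALUED_FLAGS
--             continue
--         if at_host is None and "@" in arg:
--             at_host = arg.split("@", 1)[1]
--         if colon_arg is None and ":" in arg:
--             colon_arg = arg
--         if plain is None and not arg.startswith(("/", "./", "../", "~")):
--             plain = arg
--     if at_host is not None:
--         return _strip_host_from_colon_suffix(at_host) if ":" in at_host else at_host
--     if cmd in ("scp", "sftp") and colon_arg is not None:
--         return _strip_host_from_colon_suffix(colon_arg)
--     return plain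
-- ===== Notes on version B (the rewrite author's own statement) =====
-- stated objective: alternative
-- what changed: Replaces the separate positional-collection pass plus three sequential scans of the positional list with a single loop over args that fills three first-occurrence Option slots (@-host part, colon arg, non-local-path positional) and dispatches on them at the end.
import Mathlib
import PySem

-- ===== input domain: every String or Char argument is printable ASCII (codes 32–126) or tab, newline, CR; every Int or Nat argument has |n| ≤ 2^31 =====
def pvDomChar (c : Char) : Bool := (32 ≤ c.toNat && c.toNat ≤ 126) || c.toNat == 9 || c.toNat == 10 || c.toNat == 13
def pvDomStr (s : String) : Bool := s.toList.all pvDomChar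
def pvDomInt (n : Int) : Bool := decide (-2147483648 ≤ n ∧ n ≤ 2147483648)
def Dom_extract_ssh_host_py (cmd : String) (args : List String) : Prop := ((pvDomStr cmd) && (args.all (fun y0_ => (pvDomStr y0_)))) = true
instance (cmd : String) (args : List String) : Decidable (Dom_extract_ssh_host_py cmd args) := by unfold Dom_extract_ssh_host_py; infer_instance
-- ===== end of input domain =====

-- B replaces A's positional-collection pass plus three sequential scans with one
-- loop over args maintaining three first-occurrence Option slots (alternative
-- decomposition, same cost).

-- ===== PORT A =====
def pvLooksLikeLocalPath (arg : String) : Bool :=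
  PySem.Str.startswith arg "/" || PySem.Str.startswith arg "./" ||
  PySem.Str.startswith arg "../" || PySem.Str.startswith arg "~"

-- s.split(":")[0]: sep ≠ "" so split? returns some, and a split is never empty,
-- so the defaults are unreachable (exact).
def pvStripHostFromColonSuffix (s : String) : String :=
  if PySem.Str.startswith s "[" then
    let e := PySem.Str.find s "]"
    if e ≠ -1 then PySem.Str.slice s (some 1) (some e)
    else ((PySem.Str.split? s ":").getD []).getD 0 ""
  else ((PySem.Str.split? s ":").getD []).getD 0 ""

def pvSshValuedFlags : List String :=
  ["-b", "-c", "-D", "-E", "-e", "-F", "-I", "-i", "-J", "-L",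
   "-l", "-m", "-O", "-o", "-P", "-p", "-Q", "-R", "-S", "-W", "-w"]

-- arg.split("@", 1)[1]: only evaluated when "@" in arg, so the split has a
-- second element and the defaults are unreachable (exact).
def pvAtHostPart (arg : String) : String :=
  ((PySem.Str.splitMax? arg "@" 1).getD []).getD 1 ""

def pvCollectPositionals (args : List String) : List String :=
  (args.foldl (fun (st : List String × Bool) arg =>
    if st.2 then (st.1, false)
    else if PySem.Str.startswith arg "-" then (st.1, pvSshValuedFlags.contains arg)
    else (st.1 ++ [arg], false)) ([], false)).1

def extract_ssh_host_py (cmd : String) (args : List String) : Option String :=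
  let positionals := pvCollectPositionals args
  -- Pass 3 lives after both earlier passes; shared by both branches below.
  let pass3 := positionals.find? (fun a => !pvLooksLikeLocalPath a)
  match positionals.find? (fun a => PySem.Str.isIn "@" a) with
  | some arg =>
      let hostPart := pvAtHostPart arg
      some (if PySem.Str.isIn ":" hostPart then pvStripHostFromColonSuffix hostPart else hostPart)
  | none =>
      if cmd == "scp" || cmd == "sftp" then
        match positionals.find? (fun a => PySem.Str.isIn ":" a) with
        | some arg => some (pvStripHostFromColonSuffix arg)
        | none => pass3
      else pass3

-- ===== PORT B =====
def extract_ssh_host_py_alt (cmd : String) (args : List String) : Option String :=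
  let st := args.foldl
    (fun (st : Option String × Option String × Option String × Bool) arg =>
      let (atH, colA, plain, skip) := st
      if skip then (atH, colA, plain, false)
      else if PySem.Str.startswith arg "-" then
        (atH, colA, plain, pvSshValuedFlags.contains arg)
      else
        (if atH.isNone && PySem.Str.isIn "@" arg then some (pvAtHostPart arg) else atH,
         if colA.isNone && PySem.Str.isIn ":" arg then some arg else colA,
         if plain.isNone && !pvLooksLikeLocalPath arg then some arg else plain,
         false))
    (none, none, none, false)
  match st.1 with
  | some h => some (if PySem.Str.isIn ":" h then pvStripHostFromColonSuffix h else h)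
  | none =>
      if cmd == "scp" || cmd == "sftp" then
        match st.2.1 with
        | some c => some (pvStripHostFromColonSuffix c)
        | none => st.2.2.1
      else st.2.2.1

-- ===== PRECONDITION & SPEC =====
def Spec_extract_ssh_host_py (cmd : String) (args : List String) (out : Option String) : Prop := out = extract_ssh_host_py_alt cmd args
instance (cmd : String) (args : List String) (out : Option String) : Decidable (Spec_extract_ssh_host_py cmd args out) := by unfold Spec_extract_ssh_host_py; infer_instance

-- ===== CLAIM (what is proved, stated in full; the proofs are below) =====
def Claim_equal_extract_ssh_host_py : Prop := ∀ (cmd : String) (args : List String), Dom_extract_ssh_host_py cmd args → Spec_extract_ssh_host_py cmd args (extract_ssh_host_py cmd args)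

-- ===== LEMMAS AND PROOFS =====

-- keep an already-filled slot, else take the candidate
def pvFill {α : Type} (o : Option α) (x : Option α) : Option α :=
  match o with
  | some v => some v
  | none => x

-- Recursive characterisation of the positionals collected from `args` with
-- pending skip flag `s`.
def pvPosRec : List String → Bool → List String
  | [], _ => []
  | _ :: rest, true => pvPosRec rest false
  | a :: rest, false =>
      if PySem.Str.startswith a "-" then pvPosRec rest (pvSshValuedFlags.contains a)
      else a :: pvPosRec rest false

theorem pvCollect_foldl (args : List String) (acc : List String) (s : Bool) :
    (args.foldl (fun (st : List String × Bool) arg =>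
      if st.2 then (st.1, false)
      else if PySem.Str.startswith arg "-" then (st.1, pvSshValuedFlags.contains arg)
      else (st.1 ++ [arg], false)) (acc, s)).1 = acc ++ pvPosRec args s := by
  induction args generalizing acc s with
  | nil => simp [pvPosRec]
  | cons a rest ih =>
      cases s with
      | true => simpa [pvPosRec] using ih acc false
      | false =>
          by_cases h : PySem.Chars.startswith a.toList ['-'] = true
          · simpa [pvPosRec, h] using ih acc (pvSshValuedFlags.contains a)
          · simpa [pvPosRec, h, List.append_assoc] using ih (acc ++ [a]) false

theorem pvCollect_eq (args : List String) :
    pvCollectPositionals args = pvPosRec args false := by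
  unfold pvCollectPositionals
  rw [pvCollect_foldl]
  simp

-- B's one-pass fold computes, from any partial state, the first-occurrence
-- slots over the remaining positionals.
theorem pvAltFold (args : List String) (a c p : Option String) (s : Bool) :
    (args.foldl
      (fun (st : Option String × Option String × Option String × Bool) arg =>
        let (atH, colA, plain, skip) := st
        if skip then (atH, colA, plain, false)
        else if PySem.Str.startswith arg "-" then
          (atH, colA, plain, pvSshValuedFlags.contains arg)
        else
          (if atH.isNone && PySem.Str.isIn "@" arg then some (pvAtHostPart arg) else atH,
           if colA.isNone && PySem.Str.isIn ":" arg then some arg else colA,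
           if plain.isNone && !pvLooksLikeLocalPath arg then some arg else plain,
           false))
      (a, c, p, s)).1 =
      pvFill a (((pvPosRec args s).find? (fun x => PySem.Str.isIn "@" x)).map pvAtHostPart) ∧
    (args.foldl
      (fun (st : Option String × Option String × Option String × Bool) arg =>
        let (atH, colA, plain, skip) := st
        if skip then (atH, colA, plain, false)
        else if PySem.Str.startswith arg "-" then
          (atH, colA, plain, pvSshValuedFlags.contains arg)
        else
          (if atH.isNone && PySem.Str.isIn "@" arg then some (pvAtHostPart arg) else atH,
           if colA.isNone && PySem.Str.isIn ":" arg then some arg else colA,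
           if plain.isNone && !pvLooksLikeLocalPath arg then some arg else plain,
           false))
      (a, c, p, s)).2.1 =
      pvFill c ((pvPosRec args s).find? (fun x => PySem.Str.isIn ":" x)) ∧
    (args.foldl
      (fun (st : Option String × Option String × Option String × Bool) arg =>
        let (atH, colA, plain, skip) := st
        if skip then (atH, colA, plain, false)
        else if PySem.Str.startswith arg "-" then
          (atH, colA, plain, pvSshValuedFlags.contains arg)
        else
          (if atH.isNone && PySem.Str.isIn "@" arg then some (pvAtHostPart arg) else atH,
           if colA.isNone && PySem.Str.isIn ":" arg then some arg else colA,
           if plain.isNone && !pvLooksLikeLocalPath arg then some arg else plain,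
           false))
      (a, c, p, s)).2.2.1 =
      pvFill p ((pvPosRec args s).find? (fun x => !pvLooksLikeLocalPath x)) := by
  induction args generalizing a c p s with
  | nil => cases a <;> cases c <;> cases p <;> simp [pvPosRec, pvFill]
  | cons arg rest ih =>
      cases s with
      | true => simpa [pvPosRec] using ih a c p false
      | false =>
          by_cases h : PySem.Chars.startswith arg.toList ['-'] = true
          · simpa [pvPosRec, h] using ih a c p (pvSshValuedFlags.contains arg)
          · have step := ih
              (if a.isNone && PySem.Str.isIn "@" arg then some (pvAtHostPart arg) else a)
              (if c.isNone && PySem.Str.isIn ":" arg then some arg else c)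
              (if p.isNone && !pvLooksLikeLocalPath arg then some arg else p)
              false
            refine ⟨?_, ?_, ?_⟩
            · cases a with
              | some v => simpa [pvPosRec, h, pvFill] using step.1
              | none =>
                  by_cases h1 : PySem.Chars.isIn ['@'] arg.toList = true <;>
                    simpa [pvPosRec, h, pvFill, h1] using step.1
            · cases c with
              | some v => simpa [pvPosRec, h, pvFill] using step.2.1
              | none =>
                  by_cases h2 : PySem.Chars.isIn [':'] arg.toList = true <;>
                    simpa [pvPosRec, h, pvFill, h2] using step.2.1
            · cases p with
              | some v => simpa [pvPosRec, h, pvFill] using step.2.2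
              | none =>
                  by_cases h3 : pvLooksLikeLocalPath arg = true <;>
                    simpa [pvPosRec, h, pvFill, h3] using step.2.2

-- ===== VERDICT (by name: the statement is the Claim_ definition above) =====
theorem extract_ssh_host_py_spec : Claim_equal_extract_ssh_host_py := by
  intro cmd args _
  unfold Spec_extract_ssh_host_py extract_ssh_host_py extract_ssh_host_py_alt
  obtain ⟨h1, h2, h3⟩ := pvAltFold args none none none false
  simp only []
  rw [h1, h2, h3, pvCollect_eq]
  cases hA : (pvPosRec args false).find? (fun x => PySem.Str.isIn "@" x) with
  | some arg => rfl
  | none =>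
      simp only [pvFill, Option.map_none]
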